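-- pv_equiv track=rewrite | github.com/AlexeySorokin/Gapping | read_write.py | parse_ud_output
-- ===== SOURCE A (Python) =====
-- def parse_ud_output(s: str):
--     answer, curr_sent_data = [], []
--     for line in s.splitlines():
--         line = line.strip()
--         if line.startswith("#"):
--             continue
--         elif line == "":
--             if len(curr_sent_data) > 0:
--                 answer.append(curr_sent_data)
--             curr_sent_data = []
--             continue
--         splitted = line.split("\t")
--         if splitted[0].isdigit():
--             curr_sent_data.append(splitted)
--     if len(curr_sent_data) > 0:
--         answer.append(curr_sent_data)
--     return answer
-- ===== SOURCE B (Python) =====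
-- def parse_ud_output(s: str):
--     # phase 1: segment stripped lines into blocks separated by blank lines
--     blocks, cur = [], []
--     for line in s.splitlines():
--         t = line.strip()
--         if t != "":
--             cur.append(t)
--         else:
--             blocks.append(cur)
--             cur = []
--     blocks.append(cur)
--
--     # phase 2: keep token rows of each block; drop blocks with no rows
--     def rows_of(block):
--         return [l.split("\t") for l in block
--                 if not l.startswith("#") and l.split("\t")[0].isdigit()]
--
--     return [rows for rows in map(rows_of, blocks) if rows]
-- ===== Notes on version B (the rewrite author's own statement) =====
-- stated objective: alternative
-- what changed: Replaces A's single stateful loop (current-sentence accumulator flushed on blank lines and at the end) with a two-phase pass: first segment the stripped lines into blank-separated blocks, then filter/map each block to its token rows and keep the non-empty row lists.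
import Mathlib
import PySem

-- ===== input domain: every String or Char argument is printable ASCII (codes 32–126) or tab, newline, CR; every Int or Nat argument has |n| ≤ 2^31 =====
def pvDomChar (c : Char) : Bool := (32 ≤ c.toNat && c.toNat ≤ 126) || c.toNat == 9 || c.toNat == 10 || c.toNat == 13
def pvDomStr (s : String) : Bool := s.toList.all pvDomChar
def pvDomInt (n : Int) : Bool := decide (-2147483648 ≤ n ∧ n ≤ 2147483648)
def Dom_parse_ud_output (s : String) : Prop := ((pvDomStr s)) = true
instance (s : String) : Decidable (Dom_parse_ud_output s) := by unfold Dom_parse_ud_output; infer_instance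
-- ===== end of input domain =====

-- B replaces A's single stateful accumulator loop with a two-phase pass
-- (segment into blank-separated blocks, then filter/map each block); same cost, different decomposition.

-- shared primitive: Python's line.split("\t") (separator non-empty, result never empty)
def pvSplitTab (l : String) : List String :=
  (PySem.Chars.splitOn l.toList "\t".toList).map (fun cs => String.ofList cs)

-- ===== PORT A =====
-- one iteration of A's loop over the state (answer, curr_sent_data)
def pvStepA (st : List (List (List String)) × List (List String)) (line : String) :
    List (List (List String)) × List (List String) :=
  let line := PySem.Str.strip line
  if PySem.Str.startswith line "#" then st
  else if line = "" then
    ((if st.2.length > 0 then st.1 ++ [st.2] else st.1), [])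
  else
    let splitted := pvSplitTab line
    -- splitted[0]: split with a non-empty separator is never empty, so headD "" is exact
    if PySem.Str.strIsdigit (splitted.headD "") then (st.1, st.2 ++ [splitted]) else st

def parse_ud_output (s : String) : List (List (List String)) :=
  let st := (PySem.Str.splitlines s).foldl pvStepA ([], [])
  if st.2.length > 0 then st.1 ++ [st.2] else st.1

-- ===== PORT B =====
-- phase-1 iteration: segment stripped lines into blocks, state (blocks, cur)
def pvSeg (st : List (List String) × List String) (line : String) :
    List (List String) × List String :=
  let t := PySem.Str.strip line
  if t ≠ "" then (st.1, st.2 ++ [t]) else (st.1 ++ [st.2], [])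

-- phase 2: token rows of a block ([l.split('\t') for l in block if …])
def pvRowsOf (block : List String) : List (List String) :=
  (block.filter (fun l =>
      !PySem.Str.startswith l "#" &&
      PySem.Str.strIsdigit ((pvSplitTab l).headD ""))).map pvSplitTab

def parse_ud_output_alt (s : String) : List (List (List String)) :=
  let st := (PySem.Str.splitlines s).foldl pvSeg ([], [])
  let blocks := st.1 ++ [st.2]
  (blocks.map pvRowsOf).filter (fun rows => rows ≠ [])

-- ===== PRECONDITION & SPEC =====
def Spec_parse_ud_output (s : String) (out : List (List (List String))) : Prop := out = parse_ud_output_alt s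
instance (s : String) (out : List (List (List String))) : Decidable (Spec_parse_ud_output s out) := by unfold Spec_parse_ud_output; infer_instance

-- ===== CLAIM (what is proved, stated in full; the proofs are below) =====
def Claim_equal_parse_ud_output : Prop := ∀ (s : String), Dom_parse_ud_output s → Spec_parse_ud_output s (parse_ud_output s)

-- ===== LEMMAS AND PROOFS =====

def pvFinishA (st : List (List (List String)) × List (List String)) : List (List (List String)) :=
  if st.2.length > 0 then st.1 ++ [st.2] else st.1

def pvFinishB (st : List (List String) × List String) : List (List (List String)) :=
  ((st.1 ++ [st.2]).map pvRowsOf).filter (fun rows => rows ≠ [])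

theorem pvRowsOf_nil : pvRowsOf [] = [] := by simp [pvRowsOf]

theorem pvRowsOf_append_single (cur : List String) (t : String) :
    pvRowsOf (cur ++ [t]) =
      pvRowsOf cur ++
        (if (!PySem.Str.startswith t "#" &&
             PySem.Str.strIsdigit ((pvSplitTab t).headD "")) = true
         then [pvSplitTab t] else []) := by
  simp only [pvRowsOf, List.filter_append, List.map_append]
  cases h1 : PySem.Chars.startswith t.toList ['#'] <;>
    cases h2 : PySem.Chars.strIsdigit ((pvSplitTab t).head?.getD "").toList <;>
      simp [List.filter, h1, h2]

theorem pvSingleton_keep (cur : List String) :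
    ([pvRowsOf cur].filter (fun rows => rows ≠ [])) =
      (if (pvRowsOf cur).length > 0 then [pvRowsOf cur] else []) := by
  by_cases h : pvRowsOf cur = []
  · simp [h]
  · have hl : (pvRowsOf cur).length > 0 := by
      cases hc : pvRowsOf cur with
      | nil => exact absurd hc h
      | cons a l => simp
    simp [h, hl]

theorem pvSeg_blocks (lines : List String) :
    ∀ (bs : List (List String)) (cur : List String),
      lines.foldl pvSeg (bs, cur) =
        (bs ++ (lines.foldl pvSeg ([], cur)).1, (lines.foldl pvSeg ([], cur)).2) := by
  induction lines with
  | nil => intro bs cur; simp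
  | cons l rest ih =>
    intro bs cur
    simp only [List.foldl_cons, pvSeg]
    split_ifs with h
    · exact ih bs (cur ++ [PySem.Str.strip l])
    · rw [List.nil_append, ih (bs ++ [cur]) [], ih [cur] []]
      simp

theorem pvMain (lines : List String) :
    ∀ (ans : List (List (List String))) (cur : List String),
      pvFinishA (lines.foldl pvStepA (ans, pvRowsOf cur)) =
        ans ++ pvFinishB (lines.foldl pvSeg ([], cur)) := by
  induction lines with
  | nil =>
    intro ans cur
    simp only [List.foldl_nil, pvFinishA, pvFinishB, List.map_cons, List.map_nil,
      List.nil_append]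
    rw [pvSingleton_keep]
    split_ifs <;> simp
  | cons l rest ih =>
    intro ans cur
    by_cases hc : PySem.Str.startswith (PySem.Str.strip l) "#" = true
    · -- comment line: A skips it; B adds it to the block but filters it out later
      have hne : ¬ PySem.Str.strip l = "" := by
        intro h; rw [h] at hc; revert hc; decide
      have hcC : PySem.Chars.startswith (PySem.Chars.strip l.toList) ['#'] = true := by
        simpa using hc
      have eA : pvStepA (ans, pvRowsOf cur) l = (ans, pvRowsOf cur) := by
        simp [pvStepA, hcC]
      have eB : pvSeg ([], cur) l = ([], cur ++ [PySem.Str.strip l]) := by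
        simp [pvSeg, hne]
      have hr : pvRowsOf (cur ++ [PySem.Str.strip l]) = pvRowsOf cur := by
        rw [pvRowsOf_append_single]; simp [hcC]
      rw [List.foldl_cons, List.foldl_cons, eA, eB, ← hr]
      exact ih ans (cur ++ [PySem.Str.strip l])
    · by_cases hb : PySem.Str.strip l = ""
      · -- blank line: A flushes curr_sent_data; B closes the current block
        have eA : pvStepA (ans, pvRowsOf cur) l =
            (ans ++ (if (pvRowsOf cur).length > 0 then [pvRowsOf cur] else []), pvRowsOf []) := by
          rw [pvRowsOf_nil]
          have h0 : PySem.Chars.startswith ("" : String).toList "#".toList = false := by decide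
          simp only [pvStepA, hb, PySem.Str.startswith_eq, h0, Bool.false_eq_true,
            if_false]
          split_ifs <;> simp_all [List.length_eq_zero_iff]
        have eB : pvSeg ([], cur) l = ([cur], []) := by
          simp [pvSeg, hb]
        rw [List.foldl_cons, List.foldl_cons, eA, eB,
          ih (ans ++ (if (pvRowsOf cur).length > 0 then [pvRowsOf cur] else [])) [],
          pvSeg_blocks rest [cur] []]
        have hkeep : pvFinishB ([cur] ++ (rest.foldl pvSeg ([], [])).1, (rest.foldl pvSeg ([], [])).2) =
            (if (pvRowsOf cur).length > 0 then [pvRowsOf cur] else []) ++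
              pvFinishB (rest.foldl pvSeg ([], [])) := by
          rw [← pvSingleton_keep]
          by_cases h : pvRowsOf cur = [] <;> simp [pvFinishB, List.filter, h]
        rw [hkeep, List.append_assoc]
      · -- token / other line: A conditionally appends the row; B adds the line to the block
        have hcC : PySem.Chars.startswith (PySem.Chars.strip l.toList) ['#'] = false := by
          simpa using hc
        have eA : pvStepA (ans, pvRowsOf cur) l = (ans, pvRowsOf (cur ++ [PySem.Str.strip l])) := by
          rw [pvRowsOf_append_single]
          cases h2 : PySem.Chars.strIsdigit ((pvSplitTab (PySem.Str.strip l)).head?.getD "").toList <;>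
            simp [pvStepA, hcC, hb, h2]
        have eB : pvSeg ([], cur) l = ([], cur ++ [PySem.Str.strip l]) := by
          simp [pvSeg, hb]
        rw [List.foldl_cons, List.foldl_cons, eA, eB]
        exact ih ans (cur ++ [PySem.Str.strip l])

-- ===== VERDICT (by name: the statement is the Claim_ definition above) =====
theorem parse_ud_output_spec : Claim_equal_parse_ud_output := by
  intro s _
  unfold Spec_parse_ud_output parse_ud_output parse_ud_output_alt
  have h := pvMain (PySem.Str.splitlines s) [] []
  rw [pvRowsOf_nil] at h
  simpa [pvFinishA, pvFinishB] using h
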